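-- pv_equiv track=rewrite | github.com/gupta-shantanu/dumpcode | Spoj_Solutions/vowel.py | vow
-- ===== SOURCE A (Python) =====
-- def vow(st=""):
--     ans=" "
--     st="a"+st
--     vowel="a e i o u A E I O U".split()
--     for i in range(1,len(st)):
--         n= "V" if (((st[i]=='y' or st[i]=='Y') and not(st[i-1] in vowel)) or (st[i] in vowel)) else "C"
--         if ans[len(ans)-1]!=n:
--             ans=ans+n
--
--     return ans[1:]
-- ===== SOURCE B (Python) =====
-- def vow(st=""):
--     # Count the class transitions, then synthesize the alternating answer directly:
--     # the collapsed string is fully determined by the first class and the number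
--     # of adjacent class changes, so no per-character output building is needed.
--     if not st:
--         return ""
--     vowels = set("aeiouAEIOU")
--     def isv(prev, c):
--         return c in vowels or (c in "yY" and prev not in vowels)
--     n = 1 + sum(isv(p, c) != isv(c, nx)
--                 for p, c, nx in zip("a" + st, st, st[1:]))
--     return (("VC" if isv("a", st[0]) else "CV") * n)[:n]
-- ===== Notes on version B (the rewrite author's own statement) =====
-- stated objective: alternative
-- what changed: A builds the collapsed answer character by character in one loop, appending a class whenever it differs from the last char of a growing string; B never constructs output incrementally: it counts the number of class transitions along the string, then synthesizes the whole answer in closed form as the alternating pattern ('VC' or 'CV') repeated and sliced to length transitions+1.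
import Mathlib
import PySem

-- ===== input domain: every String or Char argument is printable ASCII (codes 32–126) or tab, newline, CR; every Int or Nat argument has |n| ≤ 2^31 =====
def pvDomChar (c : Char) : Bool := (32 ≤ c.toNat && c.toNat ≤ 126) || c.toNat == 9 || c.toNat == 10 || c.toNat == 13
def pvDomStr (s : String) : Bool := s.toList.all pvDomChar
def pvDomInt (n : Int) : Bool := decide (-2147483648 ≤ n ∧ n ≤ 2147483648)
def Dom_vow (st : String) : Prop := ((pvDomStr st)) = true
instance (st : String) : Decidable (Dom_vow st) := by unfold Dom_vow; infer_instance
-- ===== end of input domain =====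

-- B replaces A's inline run-collapse by counting class transitions and synthesizing the
-- alternating "V"/"C" answer directly by repetition and slicing (alternative algorithm).


-- ===== PORT A =====
-- "a e i o u A E I O U".split() is a list of one-character strings compared with
-- the one-character strings st[i] / st[i-1]; ported as a List Char (exact on this code).
def vow (st : String) : String :=
  let st' : List Char := 'a' :: st.toList
  let vowel : List Char := ['a','e','i','o','u','A','E','I','O','U']
  let ans : List Char :=
    (PySem.List.pyRange 1 (PySem.List.len st') 1).foldl (fun ans i =>
      let n : Char :=
        if ((PySem.List.pyGetD st' i ' ' = 'y' ∨ PySem.List.pyGetD st' i ' ' = 'Y') ∧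
              ¬ (PySem.List.pyGetD st' (i-1) ' ' ∈ vowel)) ∨
           PySem.List.pyGetD st' i ' ' ∈ vowel then 'V' else 'C'
      if PySem.List.pyGetD ans (PySem.List.len ans - 1) ' ' ≠ n then ans ++ [n] else ans)
      [' ']
  String.ofList (ans.drop 1)

-- ===== PORT B =====
-- B's local set and classifier (helpers stay helpers)
def vowelsB : PySem.Set Char := PySem.Set.ofList "aeiouAEIOU".toList
def isvB (prev c : Char) : Bool :=
  PySem.Set.contains vowelsB c ||
  ((c = 'y' || c = 'Y') && !(PySem.Set.contains vowelsB prev))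

def vow_alt (st : String) : String :=
  match st.toList with
  | [] => ""
  | c0 :: rest =>
    let l : List Char := c0 :: rest
    -- sum(isv(p,c) != isv(c,nx) for p,c,nx in zip("a"+st, st, st[1:]))
    let n : Nat := 1 + (List.zip (List.zip ('a' :: l) l) (l.drop 1)).foldl
        (fun acc t => acc + (if isvB t.1.1 t.1.2 ≠ isvB t.1.2 t.2 then 1 else 0)) 0
    let pat : List Char := if isvB 'a' c0 then ['V','C'] else ['C','V']
    -- (pat * n)[:n]
    String.ofList (((List.replicate n pat).flatten).take n)

-- ===== PRECONDITION & SPEC =====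
def Spec_vow (st : String) (out : String) : Prop := out = vow_alt st
instance (st : String) (out : String) : Decidable (Spec_vow st out) := by unfold Spec_vow; infer_instance

-- ===== CLAIM (what is proved, stated in full; the proofs are below) =====
def Claim_equal_vow : Prop := ∀ (st : String), Dom_vow st → Spec_vow st (vow st)

-- ===== LEMMAS AND PROOFS =====

-- A's classification of a character pc.2 given its predecessor pc.1
def clsA (pc : Char × Char) : Char :=
  if ((pc.2 = 'y' ∨ pc.2 = 'Y') ∧
        ¬ (pc.1 ∈ (['a','e','i','o','u','A','E','I','O','U'] : List Char))) ∨
     pc.2 ∈ (['a','e','i','o','u','A','E','I','O','U'] : List Char) then 'V' else 'C'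

-- B's classifier rendered as a class character
def clsC (p c : Char) : Char := if isvB p c then 'V' else 'C'

lemma contains_vowelsB (z : Char) :
    PySem.Set.contains vowelsB z = true ↔
      z ∈ (['a','e','i','o','u','A','E','I','O','U'] : List Char) := by
  have h : vowelsB = ['a','e','i','o','u','A','E','I','O','U'] := by decide
  rw [h]
  simp [PySem.Set.contains]

lemma clsA_eq_clsC (pc : Char × Char) : clsA pc = clsC pc.1 pc.2 := by
  unfold clsA clsC isvB
  have e2 := contains_vowelsB pc.2
  have e1 := contains_vowelsB pc.1
  cases h2 : PySem.Set.contains vowelsB pc.2 <;> cases h1 : PySem.Set.contains vowelsB pc.1 <;>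
    rw [h2] at e2 <;> rw [h1] at e1 <;> simp at e1 e2 <;>
    by_cases h3 : pc.2 = 'y' ∨ pc.2 = 'Y' <;>
    simp [h3, e1, e2]

lemma clsC_ne_space (p c : Char) : clsC p c ≠ ' ' := by
  unfold clsC; split <;> decide

lemma pyGetD_cons_shift {α : Type} (x d : α) (xs : List α) (k : Nat) :
    PySem.List.pyGetD (x :: xs) ((k : Int) + 1) d = PySem.List.pyGetD xs (k : Int) d := by
  have h : ((k : Int) + 1) = ((k + 1 : Nat) : Int) := by push_cast; ring
  rw [h, PySem.List.pyGetD_natCast, PySem.List.pyGetD_natCast]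
  simp [List.getD]

-- reading (st'[k], st'[k+1]) for k in range(len st' - 1) is zipping st' with its tail
lemma pair_map_range : ∀ (l : List Char) (p : Char),
    (List.range l.length).map
      (fun (k : Nat) => (PySem.List.pyGetD (p :: l) ((k : Int)) ' ',
                 PySem.List.pyGetD (p :: l) ((k : Int) + 1) ' '))
    = List.zip (p :: l) l := by
  intro l
  induction l with
  | nil => intro p; simp
  | cons c cs ih =>
    intro p
    rw [List.length_cons, List.range_succ_eq_map, List.map_cons, List.map_map]
    rw [List.zip_cons_cons, ← ih c]
    congr 1
    · simp [PySem.List.pyGetD]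
    · apply List.map_congr_left
      intro k hk
      simp only [Function.comp, Nat.succ_eq_add_one]
      have h1 : ((k + 1 : Nat) : Int) = ((k : Nat) : Int) + 1 := by push_cast; ring
      rw [h1, pyGetD_cons_shift]
      congr 1
      rw [show ((k : Int) + 1 + 1) = (((k+1) : Nat) : Int) + 1 by push_cast; ring,
          pyGetD_cons_shift, h1]

-- adjacent dedup seeded with a previous char (shape of A's inline collapse)
def dd (p : Char) : List Char → List Char
  | [] => []
  | c :: cs => if c = p then dd p cs else c :: dd c cs

-- adjacent dedup seeded with an optional previous char
def ddO (p : Option Char) : List Char → List Char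
  | [] => []
  | c :: cs => if some c ≠ p then c :: ddO (some c) cs else ddO (some c) cs

-- the class sequence of l classified against predecessors, seeded with p
def clsL : Char → List Char → List Char
  | _, [] => []
  | p, c :: r => clsC p c :: clsL c r

-- number of adjacent changes in a class list
def transC : List Char → Nat
  | [] => 0
  | [_] => 0
  | x :: y :: r => (if x ≠ y then 1 else 0) + transC (y :: r)

-- B's transition count over the character list, seeded with p
def cntB : Char → List Char → Nat
  | _, [] => 0
  | _, [_] => 0
  | p, c :: nx :: r => (if isvB p c ≠ isvB c nx then 1 else 0) + cntB c (nx :: r)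

-- the alternating list a, b, a, b, … of length n
def altL : Char → Char → Nat → List Char
  | _, _, 0 => []
  | a, b, n+1 => a :: altL b a n

def otherVC (c : Char) : Char := if c = 'V' then 'C' else 'V'

-- Python's ans[len(ans)-1] on a nonempty accumulator
lemma pyGetD_last (acc : List Char) (x : Char) :
    PySem.List.pyGetD (acc ++ [x]) (PySem.List.len (acc ++ [x]) - 1) ' ' = x := by
  have h : PySem.List.len (acc ++ [x]) - 1 = ((acc.length : Int)) := by
    simp [PySem.List.len_eq]
  rw [h, PySem.List.pyGetD_natCast]
  simp [List.getD]

-- A's collapse loop appends exactly dd x cl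
lemma foldl_step_eq_dd (cl : List Char) : ∀ (acc : List Char) (x : Char),
    cl.foldl (fun ans n =>
      if PySem.List.pyGetD ans (PySem.List.len ans - 1) ' ' ≠ n then ans ++ [n] else ans)
      (acc ++ [x]) = (acc ++ [x]) ++ dd x cl := by
  induction cl with
  | nil => intro acc x; simp [dd]
  | cons c cs ih =>
    intro acc x
    rw [List.foldl_cons]
    by_cases h : c = x
    · subst h
      rw [if_neg (by simp), ih acc c]
      simp [dd]
    · rw [if_pos (by simp only [pyGetD_last, ne_eq]; exact fun hh => h hh.symm)]
      rw [show acc ++ [x] ++ [c] = (acc ++ [x]) ++ [c] by simp, ih (acc ++ [x]) c]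
      simp [dd, h]

lemma dd_eq_ddO (cl : List Char) : ∀ (p : Char), dd p cl = ddO (some p) cl := by
  induction cl with
  | nil => intro p; rfl
  | cons c cs ih =>
    intro p
    by_cases h : c = p
    · subst h; simp [dd, ddO, ih]
    · simp [dd, ddO, h, ih]

-- seeding dd with a char absent from cl is ddO seeded with none
lemma dd_seed_eq_ddO_none (cl : List Char) (x : Char) (hx : ∀ c ∈ cl, c ≠ x) :
    dd x cl = ddO none cl := by
  cases cl with
  | nil => rfl
  | cons c cs =>
    have hc : c ≠ x := hx c (by simp)
    simp [dd, ddO, hc, dd_eq_ddO]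

-- the zipped classification is clsL
lemma zipmap_eq_clsL : ∀ (l : List Char) (p : Char),
    (List.zip (p :: l) l).map (fun pc => clsC pc.1 pc.2) = clsL p l := by
  intro l
  induction l with
  | nil => intro p; rfl
  | cons c cs ih => intro p; simp [clsL, ← ih c]

-- the class sequence A reads by indices equals clsL 'a' l
lemma map_clsA_range (l : List Char) : (List.range l.length).map (fun (k : Nat) =>
      clsA (PySem.List.pyGetD ('a'::l) ((1:Int)+k-1) ' ', PySem.List.pyGetD ('a'::l) ((1:Int)+k) ' '))
      = clsL 'a' l := by
  rw [← zipmap_eq_clsL l 'a', ← pair_map_range l 'a', List.map_map]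
  apply List.map_congr_left
  intro k hk
  simp only [Function.comp]
  have e1 : (1:Int) + k - 1 = ((k : Nat) : Int) := by ring
  have e2 : (1:Int) + k = ((k : Nat) : Int) + 1 := by ring
  rw [e1, e2, clsA_eq_clsC]

-- A's whole loop computes ddO none (clsL 'a' l)
lemma mainA (l : List Char) :
    (((PySem.List.pyRange 1 (PySem.List.len ('a' :: l)) 1).foldl (fun ans i =>
        if PySem.List.pyGetD ans (PySem.List.len ans - 1) ' '
             ≠ clsA (PySem.List.pyGetD ('a'::l) (i-1) ' ', PySem.List.pyGetD ('a'::l) i ' ')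
        then ans ++ [clsA (PySem.List.pyGetD ('a'::l) (i-1) ' ', PySem.List.pyGetD ('a'::l) i ' ')]
        else ans) [' ']).drop 1)
    = ddO none (clsL 'a' l) := by
  have hR : PySem.List.pyRange 1 (PySem.List.len ('a'::l)) 1
      = (List.range l.length).map (fun (k : Nat) => (1:Int) + k) := by
    rw [PySem.List.len_eq, PySem.List.pyRange_one]
    congr 1
    simp
  rw [hR, List.foldl_map]
  rw [show (List.foldl
        (fun (x : List Char) (y : Nat) =>
          if PySem.List.pyGetD x (PySem.List.len x - 1) ' ' ≠
                clsA (PySem.List.pyGetD ('a' :: l) (1 + ↑y - 1) ' ', PySem.List.pyGetD ('a' :: l) (1 + ↑y) ' ') then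
            x ++ [clsA (PySem.List.pyGetD ('a' :: l) (1 + ↑y - 1) ' ', PySem.List.pyGetD ('a' :: l) (1 + ↑y) ' ')]
          else x)
        [' '] (List.range l.length))
      = List.foldl (fun ans n =>
          if PySem.List.pyGetD ans (PySem.List.len ans - 1) ' ' ≠ n then ans ++ [n] else ans)
          [' ']
          ((List.range l.length).map (fun (k : Nat) =>
            clsA (PySem.List.pyGetD ('a'::l) ((1:Int)+k-1) ' ', PySem.List.pyGetD ('a'::l) ((1:Int)+k) ' ')))
      from (List.foldl_map
        (f := fun (k : Nat) =>
          clsA (PySem.List.pyGetD ('a'::l) ((1:Int)+k-1) ' ', PySem.List.pyGetD ('a'::l) ((1:Int)+k) ' '))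
        (g := fun (ans : List Char) (n : Char) =>
          if PySem.List.pyGetD ans (PySem.List.len ans - 1) ' ' ≠ n then ans ++ [n] else ans)
        (l := List.range l.length) (init := [' '])).symm]
  rw [map_clsA_range l]
  have hd := foldl_step_eq_dd (clsL 'a' l) [] ' '
  simp only [List.nil_append] at hd
  rw [hd]
  rw [dd_seed_eq_ddO_none _ ' ' (by
    intro c hc
    have : ∀ (m : List Char) (q : Char), c ∈ clsL q m → c ≠ ' ' := by
      intro m
      induction m with
      | nil => intro q h; cases h
      | cons x r ih =>
        intro q h
        rcases (List.mem_cons.mp h) with h | h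
        · rw [h]; exact clsC_ne_space q x
        · exact ih x h
    exact this l 'a' hc)]
  simp

-- every class character is 'V' or 'C'
lemma clsL_VC : ∀ (l : List Char) (p c : Char), c ∈ clsL p l → c = 'V' ∨ c = 'C' := by
  intro l
  induction l with
  | nil => intro p c h; cases h
  | cons x r ih =>
    intro p c h
    rcases (List.mem_cons.mp h) with h | h
    · rw [h]; unfold clsC; split
      · exact Or.inl rfl
      · exact Or.inr rfl
    · exact ih x c h

-- B's fold over the nested zip is cntB
lemma foldlB : ∀ (l : List Char) (p : Char) (acc : Nat),
    (List.zip (List.zip (p :: l) l) (l.drop 1)).foldl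
      (fun acc t => acc + (if isvB t.1.1 t.1.2 ≠ isvB t.1.2 t.2 then 1 else 0)) acc
    = acc + cntB p l := by
  intro l
  induction l with
  | nil => intro p acc; simp [cntB]
  | cons c r ih =>
    intro p acc
    cases r with
    | nil => simp [cntB]
    | cons nx r' =>
      have hZ : List.zip (List.zip (p :: c :: nx :: r') (c :: nx :: r')) ((c :: nx :: r').drop 1)
          = ((p, c), nx) :: List.zip (List.zip (c :: nx :: r') (nx :: r')) ((nx :: r').drop 1) := by
        simp [List.zip_cons_cons]
      rw [hZ, List.foldl_cons, ih c]
      show (acc + (if isvB p c ≠ isvB c nx then 1 else 0)) + cntB c (nx :: r')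
          = acc + cntB p (c :: nx :: r')
      rw [show cntB p (c :: nx :: r')
            = (if isvB p c ≠ isvB c nx then 1 else 0) + cntB c (nx :: r') from rfl]
      omega

-- the class comparison agrees with the boolean comparison
lemma cls_ne_iff (p c c' nx : Char) : (clsC p c ≠ clsC c' nx) ↔ (isvB p c ≠ isvB c' nx) := by
  unfold clsC
  cases h1 : isvB p c <;> cases h2 : isvB c' nx <;> simp

-- cntB counts the transitions of clsL
lemma cnt_eq_trans : ∀ (l : List Char) (p : Char), cntB p l = transC (clsL p l) := by
  intro l
  induction l with
  | nil => intro p; rfl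
  | cons c r ih =>
    intro p
    cases r with
    | nil => rfl
    | cons nx r' =>
      rw [show clsL p (c :: nx :: r') = clsC p c :: clsC c nx :: clsL nx r' from rfl]
      rw [show transC (clsC p c :: clsC c nx :: clsL nx r')
            = (if clsC p c ≠ clsC c nx then 1 else 0) + transC (clsC c nx :: clsL nx r') from rfl]
      rw [show cntB p (c :: nx :: r') = (if isvB p c ≠ isvB c nx then 1 else 0) + cntB c (nx :: r') from rfl]
      rw [ih c, show clsL c (nx :: r') = clsC c nx :: clsL nx r' from rfl]
      congr 1
      by_cases h : isvB p c ≠ isvB c nx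
      · rw [if_pos h, if_pos ((cls_ne_iff p c c nx).mpr h)]
      · rw [if_neg h, if_neg (fun hh => h ((cls_ne_iff p c c nx).mp hh))]

-- seeded dedup of a V/C list is the alternating list of length 1 + transitions
lemma ddO_some_alt : ∀ (xs : List Char) (p : Char), (p = 'V' ∨ p = 'C') →
    (∀ c ∈ xs, c = 'V' ∨ c = 'C') →
    ddO (some p) xs = altL (otherVC p) p (transC (p :: xs)) := by
  intro xs
  induction xs with
  | nil => intro p _ _; rfl
  | cons x r ih =>
    intro p hp hall
    have hx : x = 'V' ∨ x = 'C' := hall x (by simp)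
    have hr : ∀ c ∈ r, c = 'V' ∨ c = 'C' := fun c hc => hall c (by simp [hc])
    by_cases h : x = p
    · subst h
      rw [show ddO (some x) (x :: r) = ddO (some x) r from by simp [ddO]]
      rw [show transC (x :: x :: r) = transC (x :: r) from by simp [transC]]
      exact ih x hx hr
    · have hxo : x = otherVC p ∧ p = otherVC x := by
        rcases hp with hp | hp <;> rcases hx with hx | hx <;> subst hp <;> subst hx <;>
          first | (exact absurd rfl h) | exact ⟨rfl, rfl⟩
      rw [show ddO (some p) (x :: r) = x :: ddO (some x) r from by simp [ddO, h]]
      have hpx : p ≠ x := fun hh => h hh.symm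
      rw [show transC (p :: x :: r) = 1 + transC (x :: r) from by simp [transC, hpx]]
      rw [show altL (otherVC p) p (1 + transC (x :: r))
            = otherVC p :: altL p (otherVC p) (transC (x :: r)) from by rw [Nat.add_comm]; rfl]
      rw [← hxo.1, hxo.2, ih x hx hr]

lemma ddO_none_alt (x : Char) (xs : List Char) (hx : x = 'V' ∨ x = 'C')
    (hall : ∀ c ∈ xs, c = 'V' ∨ c = 'C') :
    ddO none (x :: xs) = altL x (otherVC x) (1 + transC (x :: xs)) := by
  rw [show ddO none (x :: xs) = x :: ddO (some x) xs from by simp [ddO]]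
  rw [show altL x (otherVC x) (1 + transC (x :: xs))
        = x :: altL (otherVC x) x (transC (x :: xs)) from by rw [Nat.add_comm]; rfl]
  rw [ddO_some_alt xs x hx hall]

-- taking n from n copies of [a,b] yields the alternating list of length n
lemma take_replicate_alt (a b : Char) : ∀ (m n : Nat), n ≤ 2 * m →
    ((List.replicate m [a,b]).flatten).take n = altL a b n := by
  intro m
  induction m with
  | zero => intro n hn; interval_cases n; rfl
  | succ m ih =>
    intro n hn
    rw [List.replicate_succ, List.flatten_cons]
    match n with
    | 0 => rfl
    | 1 => rfl
    | (k+2) =>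
      rw [show ([a,b] ++ (List.replicate m [a,b]).flatten).take (k+2)
            = a :: b :: ((List.replicate m [a,b]).flatten).take k from rfl]
      rw [ih k (by omega)]
      rfl

-- B's whole computation equals A's collapsed class list
lemma mainAll (c0 : Char) (rest : List Char) :
    ddO none (clsL 'a' (c0 :: rest))
    = ((List.replicate (1 + (List.zip (List.zip ('a' :: c0 :: rest) (c0 :: rest)) ((c0 :: rest).drop 1)).foldl
          (fun acc t => acc + (if isvB t.1.1 t.1.2 ≠ isvB t.1.2 t.2 then 1 else 0)) 0)
          (if isvB 'a' c0 then (['V','C'] : List Char) else ['C','V'])).flatten).take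
        (1 + (List.zip (List.zip ('a' :: c0 :: rest) (c0 :: rest)) ((c0 :: rest).drop 1)).foldl
          (fun acc t => acc + (if isvB t.1.1 t.1.2 ≠ isvB t.1.2 t.2 then 1 else 0)) 0) := by
  rw [foldlB (c0 :: rest) 'a' 0, Nat.zero_add]
  have hx : clsC 'a' c0 = 'V' ∨ clsC 'a' c0 = 'C' := by
    unfold clsC; split
    · exact Or.inl rfl
    · exact Or.inr rfl
  have hpat : (if isvB 'a' c0 then (['V','C'] : List Char) else ['C','V'])
      = [clsC 'a' c0, otherVC (clsC 'a' c0)] := by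
    unfold clsC otherVC; by_cases hb : isvB 'a' c0 = true <;> simp [hb]
  rw [hpat,
      show clsL 'a' (c0 :: rest) = clsC 'a' c0 :: clsL c0 rest from rfl,
      ddO_none_alt (clsC 'a' c0) (clsL c0 rest) hx (fun c hc => clsL_VC rest c0 c hc),
      show clsC 'a' c0 :: clsL c0 rest = clsL 'a' (c0 :: rest) from rfl,
      ← cnt_eq_trans (c0 :: rest) 'a']
  exact (take_replicate_alt (clsC 'a' c0) (otherVC (clsC 'a' c0))
    (1 + cntB 'a' (c0 :: rest)) (1 + cntB 'a' (c0 :: rest)) (by omega)).symm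

-- ===== VERDICT (by name: the statement is the Claim_ definition above) =====
theorem vow_spec : Claim_equal_vow := by
  intro st _
  unfold Spec_vow vow vow_alt
  cases h : st.toList with
  | nil => rfl
  | cons c0 rest =>
    exact congrArg String.ofList ((mainA (c0 :: rest)).trans (mainAll c0 rest))
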